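-- pv_equiv track=rewrite | github.com/RyannDaGreat/rp | rp_ptpython/bash_selection.py | get_bash_string_content_spans
-- ===== SOURCE A (Python) =====
-- from typing import List, Tuple, Optional, Set
--
-- def get_bash_string_content_spans(code: str) -> Set[Tuple[int, int]]:
--     """Spans for string contents (without quotes) in bash."""
--     spans, i = set(), 0
--     while i < len(code):
--         if code[i] == '"':
--             # Double quote - find matching
--             j = i + 1
--             while j < len(code) and code[j] != '"':
--                 if code[j] == '\\' and j + 1 < len(code):
--                     j += 2
--                 else:
--                     j += 1
--             if j < len(code) and j > i + 1:
--                 spans.add((i + 1, j))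
--             i = j + 1 if j < len(code) else j
--         elif code[i] == "'":
--             # Single quote - literal, no escapes
--             j = i + 1
--             while j < len(code) and code[j] != "'":
--                 j += 1
--             if j < len(code) and j > i + 1:
--                 spans.add((i + 1, j))
--             i = j + 1 if j < len(code) else j
--         elif code[i] == '$' and i + 1 < len(code) and code[i + 1] == "'":
--             # $'...' ANSI-C quoting
--             j = i + 2
--             while j < len(code) and code[j] != "'":
--                 if code[j] == '\\' and j + 1 < len(code):
--                     j += 2
--                 else:
--                     j += 1
--             if j < len(code) and j > i + 2:
--                 spans.add((i + 2, j))
--             i = j + 1 if j < len(code) else j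
--         else:
--             i += 1
--     return spans
-- ===== SOURCE B (Python) =====
-- def get_bash_string_content_spans(code):
--     """Spans for string contents (without quotes) in bash — single linear state machine."""
--     spans = set()
--     n = len(code)
--     in_string = False
--     close = ' '
--     esc_ok = False
--     start = 0
--     escaped = False
--     i = 0
--     while i < n:
--         c = code[i]
--         if not in_string:
--             if c == '"':
--                 in_string, close, esc_ok, start = True, '"', True, i + 1
--             elif c == "'":
--                 in_string, close, esc_ok, start = True, "'", False, i + 1
--             elif c == '$' and i + 1 < n and code[i + 1] == "'":
--                 in_string, close, esc_ok, start = True, "'", True, i + 2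
--                 i += 1
--         else:
--             if escaped:
--                 escaped = False
--             elif esc_ok and c == '\\' and i + 1 < n:
--                 escaped = True
--             elif c == close:
--                 if i > start:
--                     spans.add((start, i))
--                 in_string = False
--     # unterminated string at end of input adds nothing
--         i += 1
--     return spans
-- ===== Notes on version B (the rewrite author's own statement) =====
-- stated objective: simpler
-- what changed: Replaces A's nested while-loops (outer scan plus three separate inner quote-matching loops that jump the index) by one linear pass over the string with an explicit state machine (in_string/close/esc_ok/start/escaped) that advances one character at a time.
import Mathlib
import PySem

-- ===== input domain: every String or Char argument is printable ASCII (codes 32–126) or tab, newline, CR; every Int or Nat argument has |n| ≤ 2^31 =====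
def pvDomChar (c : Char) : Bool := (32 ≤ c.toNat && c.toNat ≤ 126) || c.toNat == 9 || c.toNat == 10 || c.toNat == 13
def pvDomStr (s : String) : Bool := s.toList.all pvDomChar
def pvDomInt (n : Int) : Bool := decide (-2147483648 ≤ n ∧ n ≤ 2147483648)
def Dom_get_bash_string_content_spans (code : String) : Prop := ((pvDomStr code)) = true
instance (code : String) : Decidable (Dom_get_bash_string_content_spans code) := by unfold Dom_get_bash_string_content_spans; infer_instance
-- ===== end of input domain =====

-- B replaces A's nested while-loops (outer scan + three inner quote scans) by one linear pass with an
-- explicit state machine (in_string/close/esc_ok/start/escaped); objective: simpler decomposition, same cost.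

-- ===== PORT A =====

-- A's inner 'while' for " and $'…' regions (backslash escapes); q is the closing quote
def pvInnerEsc (q : Char) (cs : List Char) (j : Nat) : Nat :=
  if h : j < cs.length then
    if cs[j] = q then j
    else if cs[j] = '\\' ∧ j + 1 < cs.length then pvInnerEsc q cs (j + 2)
    else pvInnerEsc q cs (j + 1)
  else j
termination_by cs.length - j

-- A's inner 'while' for '…' regions (no escapes)
def pvInnerPlain (cs : List Char) (j : Nat) : Nat :=
  if h : j < cs.length then
    if cs[j] = '\'' then j
    else pvInnerPlain cs (j + 1)
  else j
termination_by cs.length - j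

-- the inner scans never move backwards (cited by pvLoopA's decreasing_by)
theorem pvInnerEsc_ge (q : Char) (cs : List Char) (j : Nat) : j ≤ pvInnerEsc q cs j := by
  fun_induction pvInnerEsc q cs j with
  | case1 => omega
  | case2 _ _ _ _ ih => omega
  | case3 _ _ _ _ ih => omega
  | case4 => omega

theorem pvInnerPlain_ge (cs : List Char) (j : Nat) : j ≤ pvInnerPlain cs j := by
  fun_induction pvInnerPlain cs j with
  | case1 => omega
  | case2 _ _ _ ih => omega
  | case3 => omega

-- A's outer 'while' loop
def pvLoopA (cs : List Char) (i : Nat) (spans : List (Int × Int)) : List (Int × Int) :=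
  if h : i < cs.length then
    if cs[i] = '"' then
      let j := pvInnerEsc '"' cs (i + 1)
      let spans' := if j < cs.length ∧ i + 1 < j then PySem.Set.add spans ((i : Int) + 1, (j : Int)) else spans
      if j < cs.length then pvLoopA cs (j + 1) spans' else spans'
    else if cs[i] = '\'' then
      let j := pvInnerPlain cs (i + 1)
      let spans' := if j < cs.length ∧ i + 1 < j then PySem.Set.add spans ((i : Int) + 1, (j : Int)) else spans
      if j < cs.length then pvLoopA cs (j + 1) spans' else spans'
    else if cs[i] = '$' ∧ i + 1 < cs.length ∧ cs[i + 1]! = '\'' then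
      let j := pvInnerEsc '\'' cs (i + 2)
      let spans' := if j < cs.length ∧ i + 2 < j then PySem.Set.add spans ((i : Int) + 2, (j : Int)) else spans
      if j < cs.length then pvLoopA cs (j + 1) spans' else spans'
    else pvLoopA cs (i + 1) spans
  else spans
termination_by cs.length - i
decreasing_by
  · have := pvInnerEsc_ge '"' cs (i + 1); omega
  · have := pvInnerPlain_ge cs (i + 1); omega
  · have := pvInnerEsc_ge '\'' cs (i + 2); omega
  · omega

def get_bash_string_content_spans (code : String) : List (Int × Int) :=
  pvLoopA code.toList 0 []

-- ===== PORT B =====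

-- B's single 'while' loop: one state-machine step per character
def pvLoopB (cs : List Char) (i : Nat) (inStr : Bool) (close : Char) (escOK : Bool)
    (start : Nat) (escaped : Bool) (spans : List (Int × Int)) : List (Int × Int) :=
  if h : i < cs.length then
    let c := cs[i]
    if inStr = false then
      if c = '"' then pvLoopB cs (i + 1) true '"' true (i + 1) escaped spans
      else if c = '\'' then pvLoopB cs (i + 1) true '\'' false (i + 1) escaped spans
      else if c = '$' ∧ i + 1 < cs.length ∧ cs[i + 1]! = '\'' then
        pvLoopB cs (i + 2) true '\'' true (i + 2) escaped spans
      else pvLoopB cs (i + 1) inStr close escOK start escaped spans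
    else
      if escaped then pvLoopB cs (i + 1) inStr close escOK start false spans
      else if escOK ∧ c = '\\' ∧ i + 1 < cs.length then
        pvLoopB cs (i + 1) inStr close escOK start true spans
      else if c = close then
        pvLoopB cs (i + 1) false close escOK start escaped
          (if start < i then PySem.Set.add spans ((start : Int), (i : Int)) else spans)
      else pvLoopB cs (i + 1) inStr close escOK start escaped spans
  else spans
termination_by cs.length - i

def get_bash_string_content_spans_alt (code : String) : List (Int × Int) :=
  pvLoopB code.toList 0 false ' ' false 0 false []

-- ===== PRECONDITION & SPEC =====
def Spec_get_bash_string_content_spans (code : String) (out : List (Int × Int)) : Prop := out = get_bash_string_content_spans_alt code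
instance (code : String) (out : List (Int × Int)) : Decidable (Spec_get_bash_string_content_spans code out) := by unfold Spec_get_bash_string_content_spans; infer_instance

-- ===== CLAIM (what is proved, stated in full; the proofs are below) =====
def Claim_equal_get_bash_string_content_spans : Prop := ∀ (code : String), Dom_get_bash_string_content_spans code → Spec_get_bash_string_content_spans code (get_bash_string_content_spans code)

-- ===== LEMMAS AND PROOFS =====


-- small shared arithmetic facts for the fuel inductions (keeps each proof term small)
theorem pvFuelStep {n i k : Nat} (h : n - i ≤ k + 1) (hi : i < n) : n - (i + 1) ≤ k := by omega

theorem pvFuelStep2 {n i k : Nat} (h : n - i ≤ k + 1) (hi : i < n) : n - (i + 2) ≤ k := by omega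

theorem pvFuelJump {n i e k : Nat} (h : n - i ≤ k + 1) (hi : i < n) (he : i + 1 ≤ e) :
    n - (e + 1) ≤ k := by omega


-- B inside an escape-capable string region (close is '"' or '\'') runs A's escaped inner scan
theorem pvLoopB_esc (close : Char) (hc : close ≠ '\\') (cs : List Char) :
    ∀ j start spans,
      pvLoopB cs j true close true start false spans =
        (let e := pvInnerEsc close cs j
         if e < cs.length then
           pvLoopB cs (e + 1) false close true start false
             (if start < e then PySem.Set.add spans ((start : Int), (e : Int)) else spans)
         else spans) := by
  have H : ∀ k j, cs.length - j ≤ k → ∀ start spans,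
      pvLoopB cs j true close true start false spans =
        (let e := pvInnerEsc close cs j
         if e < cs.length then
           pvLoopB cs (e + 1) false close true start false
             (if start < e then PySem.Set.add spans ((start : Int), (e : Int)) else spans)
         else spans) := by
    intro k
    induction k with
    | zero =>
      intro j hj start spans
      have hge : ¬ j < cs.length := by omega
      rw [pvLoopB, pvInnerEsc]
      simp [hge]
    | succ k ih =>
      intro j hj start spans
      by_cases hjl : j < cs.length
      · have hnc : ¬ ('\\' = close) := fun h => hc h.symm
        by_cases hq : cs[j]'hjl = close
        · rw [pvLoopB, pvInnerEsc]
          simp [hjl, hq, hc]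
        · by_cases hb : cs[j]'hjl = '\\' ∧ j + 1 < cs.length
          · rw [pvLoopB, pvInnerEsc]
            simp only [hjl, hb, hnc, dif_pos, and_self, true_and,
              if_neg, if_pos, Bool.false_eq_true, not_false_eq_true]
            have h1 : j + 1 < cs.length := hb.2
            have step : pvLoopB cs (j+1) true close true start true spans
                = pvLoopB cs (j+2) true close true start false spans := by
              rw [pvLoopB]; simp [h1]
            rw [step]
            exact ih (j+2) (pvFuelStep2 hj hjl) start spans
          · rw [pvLoopB, pvInnerEsc]
            simp only [hjl, hq, hb, dif_pos, if_neg, Bool.false_eq_true,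
              not_false_eq_true, true_and]
            exact ih (j+1) (pvFuelStep hj hjl) start spans
      · rw [pvLoopB, pvInnerEsc]; simp [hjl]
  intro j start spans; exact H (cs.length - j) j le_rfl start spans

-- B inside a single-quote region runs A's plain inner scan
theorem pvLoopB_plain (cs : List Char) :
    ∀ j start spans,
      pvLoopB cs j true '\'' false start false spans =
        (let e := pvInnerPlain cs j
         if e < cs.length then
           pvLoopB cs (e + 1) false '\'' false start false
             (if start < e then PySem.Set.add spans ((start : Int), (e : Int)) else spans)
         else spans) := by
  have H : ∀ k j, cs.length - j ≤ k → ∀ start spans,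
      pvLoopB cs j true '\'' false start false spans =
        (let e := pvInnerPlain cs j
         if e < cs.length then
           pvLoopB cs (e + 1) false '\'' false start false
             (if start < e then PySem.Set.add spans ((start : Int), (e : Int)) else spans)
         else spans) := by
    intro k
    induction k with
    | zero =>
      intro j hj start spans
      have hge : ¬ j < cs.length := by omega
      rw [pvLoopB, pvInnerPlain]
      simp [hge]
    | succ k ih =>
      intro j hj start spans
      by_cases hjl : j < cs.length
      · by_cases hq : cs[j]'hjl = '\''
        · rw [pvLoopB, pvInnerPlain]
          simp [hjl, hq]
        · rw [pvLoopB, pvInnerPlain]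
          simp only [hjl, hq, dif_pos, if_neg, Bool.false_eq_true, not_false_eq_true,
            false_and]
          exact ih (j+1) (pvFuelStep hj hjl) start spans
      · rw [pvLoopB, pvInnerPlain]; simp [hjl]
  intro j start spans; exact H (cs.length - j) j le_rfl start spans

-- main: A's loop equals B's loop in the NORMAL state (close/escOK/start are dead state there)
theorem pvLoop_eq (cs : List Char) :
    ∀ i close escOK start spans,
      pvLoopA cs i spans = pvLoopB cs i false close escOK start false spans := by
  have H : ∀ k i, cs.length - i ≤ k → ∀ close escOK start spans,
      pvLoopA cs i spans = pvLoopB cs i false close escOK start false spans := by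
    intro k
    induction k with
    | zero =>
      intro i hi close escOK start spans
      have hge : ¬ i < cs.length := by omega
      rw [pvLoopA, pvLoopB]; simp [hge]
    | succ k ih =>
      intro i hi close escOK start spans
      by_cases hil : i < cs.length
      · by_cases hd : cs[i]'hil = '"'
        · rw [pvLoopA, pvLoopB]
          simp only [hil, hd, dif_pos, if_pos]
          rw [pvLoopB_esc '"' (by decide) cs (i+1) (i+1) spans]
          have hge : i + 1 ≤ pvInnerEsc '"' cs (i + 1) := pvInnerEsc_ge '"' cs (i + 1)
          by_cases he : pvInnerEsc '"' cs (i + 1) < cs.length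
          · simp only [he, if_pos, true_and]
            rw [ih (pvInnerEsc '"' cs (i + 1) + 1) (pvFuelJump hi hil hge) '"' true (i+1) _]
            norm_cast
          · simp [he]
        · by_cases hs : cs[i]'hil = '\''
          · rw [pvLoopA, pvLoopB]
            simp only [hil, hs, dif_pos, if_pos]
            rw [pvLoopB_plain cs (i+1) (i+1) spans]
            have hge : i + 1 ≤ pvInnerPlain cs (i + 1) := pvInnerPlain_ge cs (i + 1)
            by_cases he : pvInnerPlain cs (i + 1) < cs.length
            · simp only [he, if_pos, true_and]
              rw [ih (pvInnerPlain cs (i + 1) + 1) (pvFuelJump hi hil hge) '\'' false (i+1) _]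
              norm_cast
            · simp [he]
          · by_cases ha : cs[i]'hil = '$' ∧ i + 1 < cs.length ∧ cs[i + 1]! = '\''
            · rw [pvLoopA, pvLoopB]
              simp only [hil, ha, dif_pos, if_pos]
              rw [pvLoopB_esc '\'' (by decide) cs (i+2) (i+2) spans]
              have hge : i + 2 ≤ pvInnerEsc '\'' cs (i + 2) := pvInnerEsc_ge '\'' cs (i + 2)
              by_cases he : pvInnerEsc '\'' cs (i + 2) < cs.length
              · simp only [he, if_pos, true_and]
                rw [ih (pvInnerEsc '\'' cs (i + 2) + 1) (pvFuelJump hi hil (by omega)) '\'' true (i+2) _]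
                norm_cast
              · simp [he]
            · rw [pvLoopA, pvLoopB]
              simp only [hil, hd, hs, ha, dif_pos, if_neg, not_false_eq_true]
              exact ih (i+1) (pvFuelStep hi hil) close escOK start spans
      · rw [pvLoopA, pvLoopB]; simp [hil]
  intro i close escOK start spans; exact H (cs.length - i) i le_rfl close escOK start spans

-- ===== VERDICT (by name: the statement is the Claim_ definition above) =====
theorem get_bash_string_content_spans_spec : Claim_equal_get_bash_string_content_spans := by
  intro code _
  unfold Spec_get_bash_string_content_spans get_bash_string_content_spans get_bash_string_content_spans_alt
  exact pvLoop_eq code.toList 0 ' ' false 0 []
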